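-- pv_equiv track=rewrite | github.com/tlavr/typesnalgos | ShellSort.py | KnuthSequence
-- ===== SOURCE A (Python) =====
-- def KnuthSequence(arrsize):
--     el = 1
--     ansList = []
--     while el <= arrsize:
--         ansList.append(el)
--         el = 3 * el + 1
--     ansList.reverse()
--     return ansList
-- ===== SOURCE B (Python) =====
-- def KnuthSequence(arrsize):
--     # Count terms: the m-th Knuth gap is (3**m - 1)//2, which fits iff 3**m <= 2*arrsize + 1.
--     k = 0
--     p = 3
--     while p <= 2 * arrsize + 1:
--         k += 1
--         p *= 3
--     # Build directly in descending order by closed form.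
--     return [(3 ** j - 1) // 2 for j in range(k, 0, -1)]
-- ===== Notes on version B (the rewrite author's own statement) =====
-- stated objective: alternative
-- what changed: Instead of accumulating the growing gap into a list and reversing it at the end, B first counts how many Knuth gaps fit below the bound and then emits the gaps directly in descending order via the closed form for the k-th gap.
import Mathlib
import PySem

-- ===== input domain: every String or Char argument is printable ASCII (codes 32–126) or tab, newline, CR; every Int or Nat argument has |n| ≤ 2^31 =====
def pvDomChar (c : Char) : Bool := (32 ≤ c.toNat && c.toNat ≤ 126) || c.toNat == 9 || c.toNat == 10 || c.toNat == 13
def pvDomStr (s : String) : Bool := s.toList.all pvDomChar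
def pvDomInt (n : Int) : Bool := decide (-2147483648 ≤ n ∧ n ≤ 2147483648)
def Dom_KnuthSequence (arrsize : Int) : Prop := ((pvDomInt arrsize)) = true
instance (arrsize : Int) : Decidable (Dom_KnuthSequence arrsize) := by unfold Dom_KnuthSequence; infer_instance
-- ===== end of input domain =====

-- B counts the number of gaps first and then emits them in descending order by a
-- closed form, instead of A's accumulate-then-reverse loop; objective: alternative.

-- ===== PORT A =====
-- A's while loop: el stays a positive integer (1, 4, 13, …), carried as a Nat;
-- the comparison with arrsize is performed over Int, exactly as Python's el <= arrsize.
def KnuthSequenceLoopA (arrsize : Int) (el : Nat) (ansList : List Int) : List Int :=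
  if h : (el : Int) ≤ arrsize then
    KnuthSequenceLoopA arrsize (3 * el + 1) (ansList ++ [(el : Int)])
  else ansList
  termination_by arrsize.toNat + 1 - el
  decreasing_by
    exact Nat.sub_lt_sub_left
      (Nat.lt_succ_of_le ((Int.le_toNat (le_trans (Int.natCast_nonneg el) h)).mpr h))
      (Nat.lt_succ_of_le (Nat.le_mul_of_pos_left el (by decide)))

def KnuthSequence (arrsize : Int) : List Int :=
  (KnuthSequenceLoopA arrsize 1 []).reverse

-- ===== PORT B =====
-- B's count loop: p is always the power 3^(k+1), carried as that power so the
-- loop manifestly terminates; the guard is Python's p <= 2*arrsize + 1 over Int.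
def KnuthSequenceCount (arrsize : Int) (k : Nat) : Nat :=
  if h : ((3 ^ (k + 1) : Nat) : Int) ≤ 2 * arrsize + 1 then
    KnuthSequenceCount arrsize (k + 1)
  else k
  termination_by (2 * arrsize + 1).toNat + 1 - 3 ^ (k + 1)
  decreasing_by
    exact Nat.sub_lt_sub_left
      (Nat.lt_succ_of_le ((Int.le_toNat (le_trans (Int.natCast_nonneg _) h)).mpr h))
      (Nat.pow_lt_pow_right (by decide) (Nat.lt_succ_self (k + 1)))

-- [(3**j - 1)//2 for j in range(k, 0, -1)]: the values are nonnegative and 3^j - 1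
-- is even, so Nat subtraction/division here are exact for Python's // on these operands.
def KnuthSequence_alt (arrsize : Int) : List Int :=
  let k := KnuthSequenceCount arrsize 0
  (List.range k).reverse.map (fun i => (((3 ^ (i + 1) - 1) / 2 : Nat) : Int))

-- ===== PRECONDITION & SPEC =====
def Spec_KnuthSequence (arrsize : Int) (out : List Int) : Prop := out = KnuthSequence_alt arrsize
instance (arrsize : Int) (out : List Int) : Decidable (Spec_KnuthSequence arrsize out) := by unfold Spec_KnuthSequence; infer_instance

-- ===== CLAIM (what is proved, stated in full; the proofs are below) =====
def Claim_equal_KnuthSequence : Prop := ∀ (arrsize : Int), Dom_KnuthSequence arrsize → Spec_KnuthSequence arrsize (KnuthSequence arrsize)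

-- ===== LEMMAS AND PROOFS =====

/-- The m-th Knuth gap. -/
def pvGap (m : Nat) : Nat := (3 ^ m - 1) / 2

theorem pvGap_odd (m : Nat) : 2 * pvGap m + 1 = 3 ^ m := by
  induction m with
  | zero => decide
  | succ n ih =>
    have h : (3 : Nat) ^ (n + 1) = 3 * 3 ^ n := by ring
    unfold pvGap at *
    omega

theorem pvGap_succ (m : Nat) : pvGap (m + 1) = 3 * pvGap m + 1 := by
  have h1 := pvGap_odd m
  have h2 := pvGap_odd (m + 1)
  have h : (3 : Nat) ^ (m + 1) = 3 * 3 ^ m := by ring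
  omega

theorem pvMeasure_dec (arrsize : Int) (k n : Nat)
    (hg : ((3 ^ (k + 1) : Nat) : Int) ≤ 2 * arrsize + 1)
    (hn : (2 * arrsize + 2 - 3 ^ (k + 1)).toNat ≤ n + 1) :
    (2 * arrsize + 2 - 3 ^ (k + 1 + 1)).toNat ≤ n := by
  have h1 : (1 : Int) ≤ (3 : Int) ^ (k + 1) := one_le_pow₀ (by norm_num)
  have h2 : ((3 : Int)) ^ (k + 1 + 1) = 3 * 3 ^ (k + 1) := by ring
  push_cast at *
  omega

theorem pvGuard_false (arrsize : Int) (k : Nat)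
    (hn : (2 * arrsize + 2 - 3 ^ (k + 1)).toNat ≤ 0) :
    ¬ ((3 ^ (k + 1) : Nat) : Int) ≤ 2 * arrsize + 1 := by
  push_cast at *
  omega

theorem count_ge_aux (arrsize : Int) :
    ∀ (n k : Nat), (2 * arrsize + 2 - 3 ^ (k + 1)).toNat ≤ n →
      k ≤ KnuthSequenceCount arrsize k := by
  intro n
  induction n with
  | zero =>
    intro k hn
    rw [KnuthSequenceCount, dif_neg (pvGuard_false arrsize k hn)]
  | succ n ih =>
    intro k hn
    rw [KnuthSequenceCount]
    by_cases h : ((3 ^ (k + 1) : Nat) : Int) ≤ 2 * arrsize + 1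
    · rw [dif_pos h]
      exact le_trans (Nat.le_succ k) (ih (k + 1) (pvMeasure_dec arrsize k n h hn))
    · rw [dif_neg h]

theorem count_ge (arrsize : Int) (k : Nat) : k ≤ KnuthSequenceCount arrsize k :=
  count_ge_aux arrsize ((2 * arrsize + 2 - 3 ^ (k + 1)).toNat) k (le_refl _)

/-- Main invariant: A's loop started at gap k+1 appends exactly the gaps
    k+1 … KnuthSequenceCount arrsize k, in ascending order. -/
theorem loopA_eq_aux (arrsize : Int) :
    ∀ (n k : Nat) (acc : List Int), (2 * arrsize + 2 - 3 ^ (k + 1)).toNat ≤ n →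
      KnuthSequenceLoopA arrsize (pvGap (k + 1)) acc =
        acc ++ (List.range' (k + 1) (KnuthSequenceCount arrsize k - k)).map
          (fun m => ((pvGap m : Nat) : Int)) := by
  intro n
  induction n with
  | zero =>
    intro k acc hn
    have h := pvGuard_false arrsize k hn
    have hodd : ((3 ^ (k + 1) : Nat) : Int) = 2 * ((pvGap (k + 1) : Nat) : Int) + 1 := by
      exact_mod_cast (pvGap_odd (k + 1)).symm
    have hg : ¬ ((pvGap (k + 1) : Nat) : Int) ≤ arrsize := by omega
    rw [KnuthSequenceLoopA, KnuthSequenceCount, dif_neg hg, dif_neg h]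
    simp
  | succ n ih =>
    intro k acc hn
    have hodd : ((3 ^ (k + 1) : Nat) : Int) = 2 * ((pvGap (k + 1) : Nat) : Int) + 1 := by
      exact_mod_cast (pvGap_odd (k + 1)).symm
    rw [KnuthSequenceLoopA, KnuthSequenceCount]
    by_cases h : ((3 ^ (k + 1) : Nat) : Int) ≤ 2 * arrsize + 1
    · have hg : ((pvGap (k + 1) : Nat) : Int) ≤ arrsize := by omega
      rw [dif_pos hg, dif_pos h]
      have hstep : 3 * pvGap (k + 1) + 1 = pvGap (k + 1 + 1) := (pvGap_succ (k + 1)).symm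
      rw [hstep, ih (k + 1) (acc ++ [((pvGap (k + 1) : Nat) : Int)])
        (pvMeasure_dec arrsize k n h hn)]
      have hge := count_ge arrsize (k + 1)
      have hcnt : KnuthSequenceCount arrsize (k + 1) - k =
          (KnuthSequenceCount arrsize (k + 1) - (k + 1)) + 1 := by omega
      rw [hcnt, List.range'_succ, List.map_cons, List.append_assoc]
      rfl
    · have hg : ¬ ((pvGap (k + 1) : Nat) : Int) ≤ arrsize := by omega
      rw [dif_neg hg, dif_neg h]
      simp

theorem loopA_eq (arrsize : Int) (k : Nat) (acc : List Int) :
    KnuthSequenceLoopA arrsize (pvGap (k + 1)) acc =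
      acc ++ (List.range' (k + 1) (KnuthSequenceCount arrsize k - k)).map
        (fun m => ((pvGap m : Nat) : Int)) :=
  loopA_eq_aux arrsize ((2 * arrsize + 2 - 3 ^ (k + 1)).toNat) k acc (le_refl _)

-- ===== VERDICT (by name: the statement is the Claim_ definition above) =====
theorem KnuthSequence_spec : Claim_equal_KnuthSequence := by
  intro arrsize _
  show KnuthSequence arrsize = KnuthSequence_alt arrsize
  have h1 : (1 : Nat) = pvGap 1 := by decide
  rw [KnuthSequence, h1, loopA_eq arrsize 0 [], KnuthSequence_alt]
  simp only [List.nil_append, Nat.sub_zero, Nat.zero_add]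
  rw [List.range'_eq_map_range, List.map_map, List.map_reverse, ← List.reverse_inj,
    List.reverse_reverse, List.reverse_reverse]
  apply List.map_congr_left
  intro i _
  simp [pvGap, Nat.add_comm]
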